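-- pv_equiv track=rewrite | github.com/PolyDataLab/CourseEnrollmentPred | Predict_from_Classifier/LR/Logistic_regression.py | calculate_term_dict
-- ===== SOURCE A (Python) =====
-- def calculate_term_dict(term_dict, semester, basket, reversed_item_dict):
--     for item in basket:
--         if semester not in term_dict:
--             count_course = {}
--         else:
--             count_course = term_dict[semester]
--         if reversed_item_dict[item] not in count_course:
--             count_course[reversed_item_dict[item]] = 1
--         else:
--             count_course[reversed_item_dict[item]] = count_course[reversed_item_dict[item]]+ 1
--         term_dict[semester] = count_course
--     return term_dict
-- ===== SOURCE B (Python) =====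
-- def calculate_term_dict(term_dict, semester, basket, reversed_item_dict):
--     # Aggregate first: count each course once over the whole basket...
--     counts = {}
--     for item in basket:
--         course = reversed_item_dict[item]
--         counts[course] = counts.get(course, 0) + 1
--     # ...then merge the aggregate into term_dict in a single touch.
--     if counts:
--         inner = term_dict.get(semester)
--         if inner is None:
--             term_dict[semester] = counts
--         else:
--             for course, c in counts.items():
--                 inner[course] = inner.get(course, 0) + c
--     return term_dict
-- ===== Notes on version B (the rewrite author's own statement) =====
-- stated objective: alternative
-- what changed: B aggregates the basket into a course-count dict in one pass and then merges that aggregate into term_dict in a single step (insert-if-absent / add-into-existing-inner), instead of A's per-item read-modify-write of term_dict[semester] on every basket element.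
import Mathlib
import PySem

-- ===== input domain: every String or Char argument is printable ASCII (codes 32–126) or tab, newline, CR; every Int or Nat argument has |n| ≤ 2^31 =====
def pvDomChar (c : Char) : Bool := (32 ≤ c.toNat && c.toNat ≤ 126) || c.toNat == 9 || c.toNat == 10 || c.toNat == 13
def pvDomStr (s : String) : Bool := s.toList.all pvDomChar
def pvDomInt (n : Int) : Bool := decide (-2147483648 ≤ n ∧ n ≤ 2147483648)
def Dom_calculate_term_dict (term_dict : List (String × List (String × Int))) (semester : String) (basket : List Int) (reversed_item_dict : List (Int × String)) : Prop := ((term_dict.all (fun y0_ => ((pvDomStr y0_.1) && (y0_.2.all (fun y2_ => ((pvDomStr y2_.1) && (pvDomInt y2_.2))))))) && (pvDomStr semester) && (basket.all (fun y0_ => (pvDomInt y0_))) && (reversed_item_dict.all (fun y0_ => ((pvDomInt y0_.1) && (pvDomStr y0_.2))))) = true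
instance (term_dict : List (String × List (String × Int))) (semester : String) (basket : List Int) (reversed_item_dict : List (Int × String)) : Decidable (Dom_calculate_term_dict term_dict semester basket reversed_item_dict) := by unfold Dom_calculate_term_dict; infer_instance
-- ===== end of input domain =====

-- B aggregates the basket into a course-count dict first and then merges that aggregate into
-- term_dict once, instead of A's per-item read-modify-write of term_dict[semester]; both Pythons
-- mutate term_dict in place the same way, and the equivalence proved is about the return value.

-- boundary conversions between the assoc-list signature and PySem.Dict (shared by both ports)
def pvWrap (td : List (String × List (String × Int))) : PySem.Dict String (PySem.Dict String Int) :=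
  PySem.Dict.mk (td.map (fun p => (p.1, PySem.Dict.mk p.2)))
def pvUnwrap (d : PySem.Dict String (PySem.Dict String Int)) : List (String × List (String × Int)) :=
  d.items.map (fun p => (p.1, p.2.items))

-- ===== PORT A =====
-- one iteration of A's loop body
def pvStepA (semester : String) (reversed_item_dict : List (Int × String))
    (td : PySem.Dict String (PySem.Dict String Int)) (item : Int) :
    PySem.Dict String (PySem.Dict String Int) :=
  let count_course :=
    match td.get? semester with
    | none => PySem.Dict.mk []
    | some c => c
  let course := (PySem.Dict.mk reversed_item_dict).getD item ""   -- total under Pre_ (KeyError excluded)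
  let count_course :=
    match count_course.get? course with
    | none => count_course.insert course 1
    | some v => count_course.insert course (v + 1)
  td.insert semester count_course

def calculate_term_dict (term_dict : List (String × List (String × Int))) (semester : String) (basket : List Int) (reversed_item_dict : List (Int × String)) : List (String × List (String × Int)) :=
  pvUnwrap (basket.foldl (pvStepA semester reversed_item_dict) (pvWrap term_dict))

-- ===== PORT B =====
-- merge the aggregated counts into term_dict (the body of B's `if counts:` block)
def pvMergeB (semester : String) (counts : PySem.Dict String Int)
    (td0 : PySem.Dict String (PySem.Dict String Int)) :
    PySem.Dict String (PySem.Dict String Int) :=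
  if counts.size ≠ 0 then
    match td0.get? semester with
    | none => td0.insert semester counts
    | some inner =>
        td0.insert semester
          (counts.items.foldl (fun inn p => inn.insert p.1 (inn.getD p.1 0 + p.2)) inner)
  else td0

def calculate_term_dict_alt (term_dict : List (String × List (String × Int))) (semester : String) (basket : List Int) (reversed_item_dict : List (Int × String)) : List (String × List (String × Int)) :=
  pvUnwrap (pvMergeB semester
    (PySem.Dict.counter
      (basket.map (fun item => (PySem.Dict.mk reversed_item_dict).getD item "")))  -- total under Pre_
    (pvWrap term_dict))

-- ===== PRECONDITION & SPEC =====
-- Pre_ excludes exactly the inputs where Python A raises KeyError: a basket item that is not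
-- a key of reversed_item_dict (B raises there too).
def Pre_calculate_term_dict (term_dict : List (String × List (String × Int))) (semester : String) (basket : List Int) (reversed_item_dict : List (Int × String)) : Prop :=
  ∀ i ∈ basket, i ∈ reversed_item_dict.map Prod.fst
instance (term_dict : List (String × List (String × Int))) (semester : String) (basket : List Int) (reversed_item_dict : List (Int × String)) : Decidable (Pre_calculate_term_dict term_dict semester basket reversed_item_dict) := by unfold Pre_calculate_term_dict; infer_instance

def pvWitness_calculate_term_dict : (List (String × List (String × Int))) × String × List Int × (List (Int × String)) :=
  ([("F19", [("math", 2)])], "F19", [1, 2, 1], [(1, "math"), (2, "cs")])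

def Spec_calculate_term_dict (term_dict : List (String × List (String × Int))) (semester : String) (basket : List Int) (reversed_item_dict : List (Int × String)) (out : List (String × List (String × Int))) : Prop := out = calculate_term_dict_alt term_dict semester basket reversed_item_dict
instance (term_dict : List (String × List (String × Int))) (semester : String) (basket : List Int) (reversed_item_dict : List (Int × String)) (out : List (String × List (String × Int))) : Decidable (Spec_calculate_term_dict term_dict semester basket reversed_item_dict out) := by unfold Spec_calculate_term_dict; infer_instance

-- ===== CLAIM (what is proved, stated in full; the proofs are below) =====
def Claim_equal_calculate_term_dict : Prop := ∀ (term_dict : List (String × List (String × Int))) (semester : String) (basket : List Int) (reversed_item_dict : List (Int × String)), Dom_calculate_term_dict term_dict semester basket reversed_item_dict → Pre_calculate_term_dict term_dict semester basket reversed_item_dict → Spec_calculate_term_dict term_dict semester basket reversed_item_dict (calculate_term_dict term_dict semester basket reversed_item_dict)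

-- ===== LEMMAS AND PROOFS =====

-- "bump the count of n by one", the common inner-dict operation
def pvBump (c : PySem.Dict String Int) (n : String) : PySem.Dict String Int :=
  c.insert n (c.getD n 0 + 1)

theorem pvStepA_inner (c : PySem.Dict String Int) (n : String) :
    (match c.get? n with
     | none => c.insert n 1
     | some v => c.insert n (v + 1)) = pvBump c n := by
  cases h : c.get? n <;> simp [pvBump, PySem.Dict.getD_eq_get?_getD, h]

-- A's loop, once the semester key is present, just folds pvBump over the looked-up names
theorem pvLoopA_insert (semester : String) (rid : List (Int × String)) (basket : List Int)
    (td : PySem.Dict String (PySem.Dict String Int)) (inner : PySem.Dict String Int) :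
    basket.foldl (pvStepA semester rid) (td.insert semester inner) =
      td.insert semester
        (basket.foldl (fun c it => pvBump c ((PySem.Dict.mk rid).getD it "")) inner) := by
  induction basket generalizing inner with
  | nil => rfl
  | cons it rest ih =>
      simp only [List.foldl_cons]
      have hstep : pvStepA semester rid (td.insert semester inner) it =
          td.insert semester (pvBump inner ((PySem.Dict.mk rid).getD it "")) := by
        simp [pvStepA, PySem.Dict.get?_insert_self, pvStepA_inner,
          PySem.Dict.insert_insert_self]
      rw [hstep, ih]

-- merging the items of a nodup-keyed counter C into `inner` = folding pvBump of each key, count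
-- many times; we prove the snoc step: merging (bump C n) = merging C, then bumping n once.
theorem pv_insert_comm (M : PySem.Dict String Int) (n k : String) (a b : Int)
    (hn : M.contains n = true) (hk : k ≠ n) :
    (M.insert n a).insert k b = (M.insert k b).insert n a := by
  apply PySem.Dict.ext
  have hkn : (k == n) = false := beq_eq_false_iff_ne.mpr hk
  have hnk : (n == k) = false := beq_eq_false_iff_ne.mpr (Ne.symm hk)
  by_cases hck : M.contains k = true
  · rw [PySem.Dict.items_insert_of_contains _ b (by simp [PySem.Dict.contains_insert, hck]),
        PySem.Dict.items_insert_of_contains _ a hn,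
        PySem.Dict.items_insert_of_contains _ a (by simp [PySem.Dict.contains_insert, hn]),
        PySem.Dict.items_insert_of_contains _ b hck]
    rw [List.map_map, List.map_map]
    apply List.map_congr_left
    intro p _
    by_cases h1 : (p.1 == n) = true <;> by_cases h2 : (p.1 == k) = true <;>
      simp_all [Function.comp]
  · have hck' : M.contains k = false := by simpa using hck
    rw [PySem.Dict.items_insert_of_not_contains _ b
          (by simp [PySem.Dict.contains_insert, hck', hkn]),
        PySem.Dict.items_insert_of_contains _ a hn,
        PySem.Dict.items_insert_of_contains _ a (by simp [PySem.Dict.contains_insert, hn]),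
        PySem.Dict.items_insert_of_not_contains _ b hck']
    rw [List.map_append]
    simp
    exact fun h => absurd h hk

theorem pv_merge_insert (L : List (String × Int)) (M : PySem.Dict String Int) (n : String)
    (a : Int) (hn : M.contains n = true) (hL : ∀ p ∈ L, p.1 ≠ n) :
    L.foldl (fun inn p => inn.insert p.1 (inn.getD p.1 0 + p.2)) (M.insert n a) =
      (L.foldl (fun inn p => inn.insert p.1 (inn.getD p.1 0 + p.2)) M).insert n a := by
  induction L generalizing M with
  | nil => rfl
  | cons p L ih =>
      have hp : p.1 ≠ n := hL p (by simp)
      simp only [List.foldl_cons]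
      rw [PySem.Dict.getD_insert_of_ne _ _ _ hp,
          pv_insert_comm M n p.1 a _ hn hp,
          ih _ (by simp [PySem.Dict.contains_insert, hn])
            (fun q hq => hL q (List.mem_cons_of_mem _ hq))]

theorem pv_getD_foldl_of_ne (L : List (String × Int)) (M : PySem.Dict String Int) (n : String)
    (hL : ∀ p ∈ L, p.1 ≠ n) :
    (L.foldl (fun inn p => inn.insert p.1 (inn.getD p.1 0 + p.2)) M).getD n 0 = M.getD n 0 := by
  induction L generalizing M with
  | nil => rfl
  | cons p L ih =>
      simp only [List.foldl_cons]
      rw [ih _ (fun q hq => hL q (List.mem_cons_of_mem _ hq)),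
          PySem.Dict.getD_insert_of_ne _ _ _ (Ne.symm (hL p (by simp)))]

theorem pv_merge_bump (C : PySem.Dict String Int) (inner : PySem.Dict String Int) (n : String)
    (hnd : C.keys.Nodup) :
    (pvBump C n).items.foldl (fun inn p => inn.insert p.1 (inn.getD p.1 0 + p.2)) inner =
      pvBump ((C.items.foldl (fun inn p => inn.insert p.1 (inn.getD p.1 0 + p.2)) inner)) n := by
  by_cases hc : C.contains n = true
  · -- n already counted: its entry is overwritten in place
    obtain ⟨v, hv⟩ : ∃ v, C.get? n = some v := by
      cases h : C.get? n with
      | none =>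
          rw [PySem.Dict.get?_eq_none_iff_not_mem_keys] at h
          exact absurd ((PySem.Dict.contains_iff_mem_keys C n).mp hc) h
      | some v => exact ⟨v, rfl⟩
    have hvm : (n, v) ∈ C.items := PySem.Dict.mem_items_of_get?_eq_some C hv
    obtain ⟨L1, L2, hsplit⟩ := List.append_of_mem hvm
    have hnd' : (L1.map Prod.fst ++ n :: L2.map Prod.fst).Nodup := by
      have h := hnd
      simp only [PySem.Dict.keys, hsplit, List.map_append, List.map_cons] at h
      exact h
    have hL1 : ∀ p ∈ L1, p.1 ≠ n := by
      intro p hp hpn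
      have : n ∈ L1.map Prod.fst := hpn ▸ List.mem_map_of_mem hp
      exact (List.disjoint_of_nodup_append hnd') this (by simp)
    have hL2 : ∀ p ∈ L2, p.1 ≠ n := by
      intro p hp hpn
      have h2 := (List.nodup_append.mp hnd').2.1
      exact (List.nodup_cons.mp h2).1 (hpn ▸ List.mem_map_of_mem hp)
    have hitems : (pvBump C n).items = L1 ++ (n, C.getD n 0 + 1) :: L2 := by
      rw [pvBump, PySem.Dict.items_insert_of_contains _ _ hc, hsplit]
      simp only [List.map_append, List.map_cons, BEq.rfl]
      rw [List.map_congr_left (fun p hp => if_neg (by simpa using hL1 p hp)),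
          List.map_congr_left (fun p hp => if_neg (by simpa using hL2 p hp))]
      simp
    have hgd : C.getD n 0 = v := PySem.Dict.getD_of_get?_eq_some C 0 hv
    rw [hitems, hsplit, hgd]
    simp only [List.foldl_append, List.foldl_cons]
    set M1 := L1.foldl (fun inn p => inn.insert p.1 (inn.getD p.1 0 + p.2)) inner with hM1
    have h1 : M1.insert n (M1.getD n 0 + (v + 1)) =
        (M1.insert n (M1.getD n 0 + v)).insert n (M1.getD n 0 + v + 1) := by
      rw [PySem.Dict.insert_insert_self, ← Int.add_assoc]
    rw [h1, pv_merge_insert L2 (M1.insert n (M1.getD n 0 + v)) n _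
          (PySem.Dict.contains_insert_self M1 n _) hL2]
    rw [pvBump, pv_getD_foldl_of_ne L2 _ n hL2, PySem.Dict.getD_insert_self]
  · have hc' : C.contains n = false := by simpa using hc
    rw [pvBump, PySem.Dict.items_insert_of_not_contains _ _ hc',
        PySem.Dict.getD_of_not_contains _ _ hc']
    simp [List.foldl_append, pvBump]

-- counter over a snoc: Counter(xs + [x]) bumps x
theorem pv_counter_snoc (xs : List String) (x : String) :
    PySem.Dict.counter (xs ++ [x]) = pvBump (PySem.Dict.counter xs) x :=
  PySem.Dict.counter_append_singleton xs x

theorem pv_merge_counter (names : List String) (inner : PySem.Dict String Int) :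
    (PySem.Dict.counter names).items.foldl
        (fun inn p => inn.insert p.1 (inn.getD p.1 0 + p.2)) inner =
      names.foldl pvBump inner := by
  induction names using List.reverseRecOn with
  | nil => rfl
  | append_singleton xs x ih =>
      rw [pv_counter_snoc, pv_merge_bump _ _ _ (PySem.Dict.nodup_keys_counter xs), ih,
        List.foldl_append]
      rfl

-- A's whole loop in closed form: nothing for the empty basket, otherwise one insert at
-- `semester` of the bump-fold over the looked-up course names
theorem pvA_char (sem : String) (rid : List (Int × String)) (it : Int) (rest : List Int)
    (td0 : PySem.Dict String (PySem.Dict String Int)) :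
    (it :: rest).foldl (pvStepA sem rid) td0 =
      td0.insert sem
        ((it :: rest).foldl (fun c i => pvBump c ((PySem.Dict.mk rid).getD i ""))
          (match td0.get? sem with | none => PySem.Dict.mk [] | some c => c)) := by
  simp only [List.foldl_cons]
  have hstep : pvStepA sem rid td0 it =
      td0.insert sem
        (pvBump (match td0.get? sem with | none => PySem.Dict.mk [] | some c => c)
          ((PySem.Dict.mk rid).getD it "")) := by
    simp only [pvStepA, pvStepA_inner]
  rw [hstep, pvLoopA_insert]

theorem pv_foldl_bump_counter (rid : List (Int × String)) (l : List Int) :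
    l.foldl (fun c i => pvBump c ((PySem.Dict.mk rid).getD i "")) PySem.Dict.empty =
      PySem.Dict.counter (l.map (fun i => (PySem.Dict.mk rid).getD i "")) := by
  rw [← PySem.Dict.foldl_insert_getD_add_one_eq_counter, List.foldl_map]
  rfl

theorem pv_counter_size_ne (x : String) (xs : List String) :
    (PySem.Dict.counter (x :: xs)).size ≠ 0 := by
  intro h
  have hk : (PySem.Dict.counter (x :: xs)).keys = [] := by
    have : (PySem.Dict.counter (x :: xs)).keys.length = 0 := by
      simpa [PySem.Dict.keys, PySem.Dict.size] using h
    exact List.eq_nil_of_length_eq_zero this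
  rw [PySem.Dict.keys_counter] at hk
  have hx : x ∈ PySem.Set.ofList (x :: xs) := (PySem.Set.mem_ofList _ _).mpr (by simp)
  rw [hk] at hx
  exact (List.not_mem_nil).elim hx

-- ===== VERDICT (by name: the statement is the Claim_ definition above) =====
theorem calculate_term_dict_spec : Claim_equal_calculate_term_dict := by
  intro term_dict semester basket rid _hDom _hPre
  unfold Spec_calculate_term_dict calculate_term_dict calculate_term_dict_alt
  cases basket with
  | nil => rfl
  | cons it rest =>
      rw [pvA_char]
      have hsz : (PySem.Dict.counter
          ((it :: rest).map (fun i => (PySem.Dict.mk rid).getD i ""))).size ≠ 0 := by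
        rw [List.map_cons]; exact pv_counter_size_ne _ _
      rw [pvMergeB, if_pos hsz]
      cases h : (pvWrap term_dict).get? semester with
      | none =>
          dsimp only
          have hemp : (PySem.Dict.mk ([] : List (String × Int))) = PySem.Dict.empty := rfl
          rw [hemp, pv_foldl_bump_counter rid (it :: rest)]
      | some inner =>
          dsimp only
          rw [pv_merge_counter, List.foldl_map]
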